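-- pv_equiv track=rewrite | github.com/EricDing618/Equation | base.py | mid_parenthesis
-- ===== SOURCE A (Python) =====
-- def mid_parenthesis(e:str):
--     c1=e.split('[')
--     c2:list=[]
--     for i in range(len(c1)):
--         c3=c1[i].split("]")
--         for j in range(len(c3)):
--             c2.append(c3[j])
--     return c2
-- ===== SOURCE B (Python) =====
-- def mid_parenthesis(e: str):
--     out = []
--     buf = ''
--     for ch in e:
--         if ch == '[' or ch == ']':
--             out.append(buf)
--             buf = ''
--         else:
--             buf += ch
--     out.append(buf)
--     return out
-- ===== Notes on version B (the rewrite author's own statement) =====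
-- stated objective: alternative
-- what changed: B replaces A's split-on-'[' followed by a nested loop splitting each piece on ']' with a single left-to-right character scan that maintains a token buffer and emits it at every bracket.
import Mathlib
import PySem

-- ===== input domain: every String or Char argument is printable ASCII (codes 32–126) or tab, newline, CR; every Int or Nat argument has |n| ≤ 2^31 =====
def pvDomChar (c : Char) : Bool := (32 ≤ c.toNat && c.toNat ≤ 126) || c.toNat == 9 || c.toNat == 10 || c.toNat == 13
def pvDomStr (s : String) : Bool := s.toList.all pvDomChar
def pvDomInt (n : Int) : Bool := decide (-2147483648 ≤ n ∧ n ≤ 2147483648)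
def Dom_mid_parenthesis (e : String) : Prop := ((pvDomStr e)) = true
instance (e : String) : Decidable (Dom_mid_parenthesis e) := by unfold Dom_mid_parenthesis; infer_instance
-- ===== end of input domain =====

-- B replaces the nested split-on-'[' then split-on-']' flattening by a single
-- left-to-right scan that emits the current buffer at each bracket (alternative decomposition).

-- ===== PORT A =====
def mid_parenthesis (e : String) : List String :=
  let c1 := (PySem.Str.split? e "[").getD []
  (PySem.List.pyRange 0 (PySem.List.len c1)).foldl
    (fun c2 i =>
      let c3 := (PySem.Str.split? (PySem.List.pyGetD c1 i "") "]").getD []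
      (PySem.List.pyRange 0 (PySem.List.len c3)).foldl
        (fun c2 j => c2 ++ [PySem.List.pyGetD c3 j ""]) c2)
    []

-- ===== PORT B =====
def mid_parenthesis_alt (e : String) : List String :=
  let st := e.toList.foldl
    (fun (p : List String × String) c =>
      if c = '[' || c = ']' then (p.1 ++ [p.2], "") else (p.1, p.2.push c))
    ([], "")
  st.1 ++ [st.2]

-- ===== PRECONDITION & SPEC =====
def Spec_mid_parenthesis (e : String) (out : List String) : Prop := out = mid_parenthesis_alt e
instance (e : String) (out : List String) : Decidable (Spec_mid_parenthesis e out) := by unfold Spec_mid_parenthesis; infer_instance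

-- ===== CLAIM (what is proved, stated in full; the proofs are below) =====
def Claim_equal_mid_parenthesis : Prop := ∀ (e : String), Dom_mid_parenthesis e → Spec_mid_parenthesis e (mid_parenthesis e)

-- ===== LEMMAS AND PROOFS =====

/-- prepend `p` onto the first piece of a (nonempty) piece list. -/
def consHead (p : List Char) : List (List Char) → List (List Char)
  | [] => [p]
  | h :: t => (p ++ h) :: t

/-- split a char list on a single separator character (str.split semantics). -/
def splitCh (c : Char) : List Char → List (List Char)
  | [] => [[]]
  | x :: xs => if x = c then [] :: splitCh c xs else consHead [x] (splitCh c xs)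

/-- split on both brackets at once. -/
def tok : List Char → List (List Char)
  | [] => [[]]
  | x :: xs => if x = '[' ∨ x = ']' then [] :: tok xs else consHead [x] (tok xs)

theorem splitCh_ne_nil (c : Char) (l : List Char) : splitCh c l ≠ [] := by
  cases l with
  | nil => simp [splitCh]
  | cons x xs =>
    simp only [splitCh]
    split
    · simp
    · cases h : splitCh c xs <;> simp [consHead]

theorem tok_ne_nil (l : List Char) : tok l ≠ [] := by
  cases l with
  | nil => simp [tok]
  | cons x xs =>
    simp only [tok]
    split
    · simp
    · cases h : tok xs <;> simp [consHead]

theorem consHead_append (p : List Char) (xs ys : List (List Char)) (h : xs ≠ []) :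
    consHead p xs ++ ys = consHead p (xs ++ ys) := by
  cases xs with
  | nil => exact absurd rfl h
  | cons a t => simp [consHead]

theorem consHead_consHead (p q : List Char) (xs : List (List Char)) (h : xs ≠ []) :
    consHead p (consHead q xs) = consHead (p ++ q) xs := by
  cases xs with
  | nil => exact absurd rfl h
  | cons a t => simp [consHead]

theorem go_single (c : Char) (fuel : Nat) (l cur : List Char) (acc : List (List Char))
    (h : l.length < fuel) :
    PySem.Chars.splitOn.go [c] fuel l cur acc = acc.reverse ++ consHead cur.reverse (splitCh c l) := by
  induction fuel generalizing l cur acc with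
  | zero => omega
  | succ fuel ih =>
    cases l with
    | nil => simp [PySem.Chars.splitOn.go, splitCh, consHead]
    | cons x xs =>
      simp only [PySem.Chars.splitOn.go]
      by_cases hx : x = c
      · subst hx
        have hp : List.isPrefixOf [x] (x :: xs) = true := by simp [List.isPrefixOf]
        rw [if_pos hp]
        simp only [List.length_cons] at h
        rw [ih _ _ _ (by simpa using Nat.lt_of_succ_lt_succ h)]
        have hd : List.drop ([x].length) (x :: xs) = xs := by simp
        rw [hd]
        have hs2 : splitCh x (x :: xs) = [] :: splitCh x xs := by
          simp [splitCh]
        rw [hs2]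
        cases hs : splitCh x xs with
        | nil => exact absurd hs (splitCh_ne_nil x xs)
        | cons a t => simp [consHead]
      · have hp : List.isPrefixOf [c] (x :: xs) = false := by
          simp [List.isPrefixOf]
          exact fun hh => absurd hh.symm hx
        rw [if_neg (by simp [hp])]
        simp only [List.length_cons] at h
        rw [ih _ _ _ (Nat.lt_of_succ_lt_succ h)]
        simp only [splitCh, if_neg hx, List.reverse_cons]
        rw [consHead_consHead _ _ _ (splitCh_ne_nil c xs)]

theorem splitOn_single (c : Char) (l : List Char) :
    PySem.Chars.splitOn l [c] = splitCh c l := by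
  unfold PySem.Chars.splitOn
  rw [go_single c (l.length + 1) l [] [] (by omega)]
  cases h : splitCh c l with
  | nil => exact absurd h (splitCh_ne_nil c l)
  | cons a t => simp [consHead]

theorem split?_single (s : String) (c : Char) (sep : String) (hsep : sep.toList = [c]) :
    ((PySem.Str.split? s sep).getD []).map String.toList = splitCh c s.toList := by
  have h := PySem.Str.split?_map s sep
  rw [hsep] at h
  unfold PySem.Chars.split? at h
  simp only [List.isEmpty_cons] at h
  cases hq : PySem.Str.split? s sep with
  | none => rw [hq] at h; simp at h
  | some ps =>
    rw [hq] at h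
    simp only [Option.map_some] at h
    simpa [splitOn_single] using h

theorem flatMap_split (l : List Char) :
    (splitCh '[' l).flatMap (splitCh ']') = tok l := by
  induction l with
  | nil => simp [splitCh, tok]
  | cons x xs ih =>
    by_cases hx : x = '[' ∨ x = ']'
    · rcases hx with hx | hx
      · subst hx
        simp [splitCh, tok, ih]
      · subst hx
        have hne : ¬ ((']' : Char) = '[') := by decide
        simp only [splitCh, if_neg hne, tok]
        cases h : splitCh '[' xs with
        | nil => exact absurd h (splitCh_ne_nil _ xs)
        | cons a t =>
          rw [h] at ih
          simp only [consHead, List.flatMap_cons] at ih ⊢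
          simpa [splitCh] using ih
    · rw [not_or] at hx
      simp only [splitCh, if_neg hx.1, tok]
      cases h : splitCh '[' xs with
      | nil => exact absurd h (splitCh_ne_nil _ xs)
      | cons a t =>
        rw [h] at ih
        simp only [consHead, List.flatMap_cons] at ih ⊢
        rw [if_neg (by tauto)]
        have hxa : splitCh ']' ([x] ++ a) = consHead [x] (splitCh ']' a) := by
          simp [splitCh, hx.2]
        rw [hxa, consHead_append _ _ _ (splitCh_ne_nil ']' a), ← ih]
        rfl

theorem alt_invariant (l : List Char) (acc : List String) (buf : String) :
    ((l.foldl (fun (p : List String × String) c =>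
        if c = '[' || c = ']' then (p.1 ++ [p.2], "") else (p.1, p.2.push c))
      (acc, buf)).1 ++
    [(l.foldl (fun (p : List String × String) c =>
        if c = '[' || c = ']' then (p.1 ++ [p.2], "") else (p.1, p.2.push c))
      (acc, buf)).2]).map String.toList
    = acc.map String.toList ++ consHead buf.toList (tok l) := by
  induction l generalizing acc buf with
  | nil => simp [tok, consHead]
  | cons x xs ih =>
    by_cases hx : x = '[' ∨ x = ']'
    · have hb : (x = '[' || x = ']') = true := by
        rcases hx with hx | hx <;> simp [hx]
      simp only [List.foldl_cons, hb, if_true]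
      rw [ih]
      simp only [tok, if_pos hx, List.map_append, List.map_cons, List.map_nil]
      have hnil : ("" : String).toList = [] := rfl
      rw [hnil]
      cases h : tok xs with
      | nil => exact absurd h (tok_ne_nil xs)
      | cons a t => simp [consHead]
    · have hb : (x = '[' || x = ']') = false := by
        rw [not_or] at hx
        simp [hx.1, hx.2]
      simp only [List.foldl_cons, hb, Bool.false_eq_true, if_false]
      rw [ih, String.toList_push]
      simp only [tok, if_neg hx]
      rw [consHead_consHead _ _ _ (tok_ne_nil xs)]

theorem alt_toList (e : String) :
    (mid_parenthesis_alt e).map String.toList = tok e.toList := by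
  unfold mid_parenthesis_alt
  rw [alt_invariant e.toList [] ""]
  have hnil : ("" : String).toList = [] := rfl
  rw [hnil]
  cases h : tok e.toList with
  | nil => exact absurd h (tok_ne_nil _)
  | cons a t => simp [consHead]

theorem a_toList (e : String) :
    (mid_parenthesis e).map String.toList = tok e.toList := by
  have hsplitL : ((PySem.Str.split? e "[").getD []).map String.toList = splitCh '[' e.toList :=
    split?_single e '[' "[" (by decide)
  have hsplitR : ∀ (s : String),
      ((PySem.Str.split? s "]").getD []).map String.toList = splitCh ']' s.toList :=
    fun s => split?_single s ']' "]" (by decide)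
  have hinner : ∀ (c2 : List String) (s : String),
      (List.foldl (fun c2 j => c2 ++ [PySem.List.pyGetD ((PySem.Str.split? s "]").getD []) j ""]) c2
        (PySem.List.pyRange 0 (PySem.List.len ((PySem.Str.split? s "]").getD [])))) =
        c2 ++ (PySem.Str.split? s "]").getD [] := by
    intro c2 s
    rw [PySem.List.foldl_pyRange_pyGetD _ "" (fun acc x => acc ++ [x]) c2 (le_refl 0)]
    rw [PySem.List.foldl_append_eq_flatMap, Int.toNat_zero, List.drop_zero,
      List.flatMap_singleton']
  unfold mid_parenthesis
  simp only [hinner]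
  rw [PySem.List.foldl_pyRange_pyGetD _ "" (fun c2 s => c2 ++ (PySem.Str.split? s "]").getD []) [] (le_refl 0)]
  simp only [Int.toNat_zero, List.drop_zero]
  rw [PySem.List.foldl_append_eq_flatMap, List.nil_append, List.map_flatMap]
  have : ∀ (s : String), (fun a => List.map String.toList ((PySem.Str.split? a "]").getD [])) s
      = (fun a => splitCh ']' a.toList) s := fun s => hsplitR s
  rw [funext this]
  have h2 : List.flatMap (fun a => splitCh ']' a.toList) ((PySem.Str.split? e "[").getD [])
      = List.flatMap (splitCh ']') (((PySem.Str.split? e "[").getD []).map String.toList) := by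
    rw [List.flatMap_map]
  rw [h2, hsplitL, flatMap_split]

-- ===== VERDICT (by name: the statement is the Claim_ definition above) =====
theorem mid_parenthesis_spec : Claim_equal_mid_parenthesis := by
  intro e _
  unfold Spec_mid_parenthesis
  have h : (mid_parenthesis e).map String.toList = (mid_parenthesis_alt e).map String.toList := by
    rw [a_toList, alt_toList]
  exact List.map_injective_iff.mpr (fun _ _ hh => String.toList_injective hh) h
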